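-- pv_equiv track=rewrite | github.com/Prasanna2277/TalkMate | Seq2Seq.py | sentenceFromIds
-- ===== SOURCE A (Python) =====
-- def sentenceFromIds(predIds, vocabList):
--     eosIdx = vocabList.index('<EOS>')
--     padIdx = vocabList.index('<pad>')
--     outputs, temp = [], ""
--
--     for token in predIds:
--         if (token[0] == eosIdx or token[0] == padIdx):
--             if temp:
--                 outputs.append(temp.strip())
--                 temp = ""
--         else:
--             temp += vocabList[token[0]] + " "
--     if temp:
--         outputs.append(temp.strip())
--     return outputs
-- ===== SOURCE B (Python) =====
-- def sentenceFromIds(predIds, vocabList):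
--     eosIdx = vocabList.index('<EOS>')
--     padIdx = vocabList.index('<pad>')
--     outputs = []
--     i, n = 0, len(predIds)
--     while i < n:
--         if predIds[i][0] == eosIdx or predIds[i][0] == padIdx:
--             i += 1
--         else:
--             j = i
--             while j < n and predIds[j][0] != eosIdx and predIds[j][0] != padIdx:
--                 j += 1
--             outputs.append(' '.join(vocabList[t[0]] for t in predIds[i:j]).strip())
--             i = j
--     return outputs
-- ===== Notes on version B (the rewrite author's own statement) =====
-- stated objective: alternative
-- what changed: Replaces A's single pass with a mutable string accumulator and flush-on-delimiter logic by a two-pointer scan that extracts each maximal run of non-delimiter tokens and maps it directly to ' '.join(words).strip().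
import Mathlib
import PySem

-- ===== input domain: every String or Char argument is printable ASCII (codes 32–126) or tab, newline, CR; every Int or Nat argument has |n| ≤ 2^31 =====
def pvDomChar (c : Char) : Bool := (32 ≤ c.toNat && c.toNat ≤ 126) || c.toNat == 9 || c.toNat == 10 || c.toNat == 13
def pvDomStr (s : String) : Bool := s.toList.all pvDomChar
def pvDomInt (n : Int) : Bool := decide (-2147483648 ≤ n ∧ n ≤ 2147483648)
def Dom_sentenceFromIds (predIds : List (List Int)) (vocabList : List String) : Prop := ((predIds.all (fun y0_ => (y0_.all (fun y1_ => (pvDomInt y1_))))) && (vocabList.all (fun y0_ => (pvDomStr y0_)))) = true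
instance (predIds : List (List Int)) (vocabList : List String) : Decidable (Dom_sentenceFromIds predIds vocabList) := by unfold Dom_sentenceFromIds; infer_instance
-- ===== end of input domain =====

-- B replaces A's string accumulator + flush-on-delimiter pass by a two-pointer scan over maximal
-- runs of non-delimiter tokens, joining each run's words directly (alternative decomposition, same cost).

-- ===== PORT A =====
-- literal transliteration of A: fold over predIds carrying (outputs, temp), flush at the end
def sentenceFromIds (predIds : List (List Int)) (vocabList : List String) : List String :=
  let eosIdx : Int := (((PySem.List.index? vocabList "<EOS>").getD 0 : Nat) : Int)
  let padIdx : Int := (((PySem.List.index? vocabList "<pad>").getD 0 : Nat) : Int)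
  let st := predIds.foldl (fun (acc : List String × String) token =>
      if (PySem.List.pyGet? token 0).getD 0 = eosIdx ∨ (PySem.List.pyGet? token 0).getD 0 = padIdx then
        if acc.2 ≠ "" then (acc.1 ++ [PySem.Str.strip acc.2], "") else acc
      else
        (acc.1, acc.2 ++ (PySem.List.pyGet? vocabList ((PySem.List.pyGet? token 0).getD 0)).getD "" ++ " "))
    ([], "")
  if st.2 ≠ "" then st.1 ++ [PySem.Str.strip st.2] else st.1

-- ===== PORT B =====
-- B-side helpers: the delimiter test and the vocab lookup for a token
def pvStop (eos pad : Int) (t : List Int) : Bool :=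
  ((PySem.List.pyGet? t 0).getD 0 == eos) || ((PySem.List.pyGet? t 0).getD 0 == pad)

def pvWord (vocab : List String) (t : List Int) : String :=
  (PySem.List.pyGet? vocab ((PySem.List.pyGet? t 0).getD 0)).getD ""

-- the outer while loop of B: skip a delimiter, or split off the maximal non-delimiter run
def sentenceFromIdsAltGo (eos pad : Int) (vocab : List String) : List (List Int) → List String
  | [] => []
  | t :: rest =>
    if h : pvStop eos pad t then
      sentenceFromIdsAltGo eos pad vocab rest
    else
      PySem.Str.strip (PySem.Str.join " "
          (((t :: rest).takeWhile (fun u => !pvStop eos pad u)).map (pvWord vocab)))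
        :: sentenceFromIdsAltGo eos pad vocab ((t :: rest).dropWhile (fun u => !pvStop eos pad u))
termination_by l => l.length
decreasing_by
  · simp
  · have h1 : List.dropWhile (fun u => !pvStop eos pad u) (t :: rest)
        = List.dropWhile (fun u => !pvStop eos pad u) rest := by
      simp [List.dropWhile_cons, h]
    have h2 := List.length_dropWhile_le (p := fun u => !pvStop eos pad u) (l := rest)
    simp [h1]; omega

def sentenceFromIds_alt (predIds : List (List Int)) (vocabList : List String) : List String :=
  let eosIdx : Int := (((PySem.List.index? vocabList "<EOS>").getD 0 : Nat) : Int)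
  let padIdx : Int := (((PySem.List.index? vocabList "<pad>").getD 0 : Nat) : Int)
  sentenceFromIdsAltGo eosIdx padIdx vocabList predIds

-- ===== PRECONDITION & SPEC =====
-- Pre_ excludes exactly the inputs where the Python A raises: a vocabulary missing '<EOS>' or
-- '<pad>' (ValueError from .index), an empty token (IndexError from token[0]), or a non-delimiter
-- token id outside Python's negative-wraparound range for vocabList (IndexError).
def Pre_sentenceFromIds (predIds : List (List Int)) (vocabList : List String) : Prop :=
  "<EOS>" ∈ vocabList ∧ "<pad>" ∈ vocabList ∧
  ∀ t ∈ predIds, t ≠ [] ∧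
    (t.headI = (vocabList.idxOf "<EOS>" : Int) ∨ t.headI = (vocabList.idxOf "<pad>" : Int) ∨
      (-(vocabList.length : Int) ≤ t.headI ∧ t.headI < (vocabList.length : Int)))
instance (predIds : List (List Int)) (vocabList : List String) : Decidable (Pre_sentenceFromIds predIds vocabList) := by unfold Pre_sentenceFromIds; infer_instance

def pvWitness_sentenceFromIds : List (List Int) × List String :=
  ([[2], [3], [0], [2], [1]], ["<EOS>", "<pad>", "hello", "world"])

def Spec_sentenceFromIds (predIds : List (List Int)) (vocabList : List String) (out : List String) : Prop := out = sentenceFromIds_alt predIds vocabList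
instance (predIds : List (List Int)) (vocabList : List String) (out : List String) : Decidable (Spec_sentenceFromIds predIds vocabList out) := by unfold Spec_sentenceFromIds; infer_instance

-- ===== CLAIM (what is proved, stated in full; the proofs are below) =====
def Claim_equal_sentenceFromIds : Prop := ∀ (predIds : List (List Int)) (vocabList : List String), Dom_sentenceFromIds predIds vocabList → Pre_sentenceFromIds predIds vocabList → Spec_sentenceFromIds predIds vocabList (sentenceFromIds predIds vocabList)

-- ===== LEMMAS AND PROOFS =====

-- A's loop body and final flush, named for the proofs (definitionally A's code)
def stepA (eos pad : Int) (vocab : List String) (acc : List String × String) (token : List Int) : List String × String :=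
  if (PySem.List.pyGet? token 0).getD 0 = eos ∨ (PySem.List.pyGet? token 0).getD 0 = pad then
    if acc.2 ≠ "" then (acc.1 ++ [PySem.Str.strip acc.2], "") else acc
  else
    (acc.1, acc.2 ++ (PySem.List.pyGet? vocab ((PySem.List.pyGet? token 0).getD 0)).getD "" ++ " ")

def finishA (st : List String × String) : List String :=
  if st.2 ≠ "" then st.1 ++ [PySem.Str.strip st.2] else st.1

def goA (eos pad : Int) (vocab : List String) (l : List (List Int)) (temp : String) : List String :=
  finishA (l.foldl (stepA eos pad vocab) ([], temp))

-- A's accumulated temp after consuming words ws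
def renderS (ws : List String) : String :=
  ws.foldl (fun a w => a ++ w ++ " ") ""

theorem stepA_eq_ite (eos pad : Int) (vocab : List String) (acc : List String × String) (t : List Int) :
    stepA eos pad vocab acc t =
      if pvStop eos pad t then (if acc.2 ≠ "" then (acc.1 ++ [PySem.Str.strip acc.2], "") else acc)
      else (acc.1, acc.2 ++ pvWord vocab t ++ " ") := by
  simp [stepA, pvStop, pvWord]

-- a trailing space disappears under strip
theorem rstrip_append_space (cs : List Char) :
    PySem.Chars.rstrip (cs ++ [' ']) = PySem.Chars.rstrip cs := by
  have hsp : PySem.Chars.isspace ' ' = true := rfl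
  simp [PySem.Chars.rstrip, List.dropWhile_cons, hsp]

theorem strip_append_space (cs : List Char) :
    PySem.Chars.strip (cs ++ [' ']) = PySem.Chars.strip cs := by
  have hsp : PySem.Chars.isspace ' ' = true := rfl
  simp only [PySem.Chars.strip, PySem.Chars.lstrip, List.dropWhile_append]
  by_cases h : (List.dropWhile PySem.Chars.isspace cs).isEmpty = true
  · rw [List.isEmpty_iff] at h
    simp [h, List.dropWhile_cons, hsp, PySem.Chars.rstrip]
  · simp [h, rstrip_append_space]

-- concatenating word-plus-space blocks = space-join plus one trailing space (nonempty case)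
theorem flatten_blocks_eq_join (ls : List (List Char)) (h : ls ≠ []) :
    (ls.map (fun x => x ++ [' '])).flatten = PySem.Chars.join [' '] ls ++ [' '] := by
  induction ls with
  | nil => exact absurd rfl h
  | cons x t ih =>
    cases t with
    | nil => simp [PySem.Chars.join_singleton]
    | cons y t' =>
      rw [List.map_cons, List.flatten_cons, ih (by simp), PySem.Chars.join_cons_cons]
      simp

theorem renderS_toList (ws : List String) :
    (renderS ws).toList = ((ws.map String.toList).map (fun x => x ++ [' '])).flatten := by
  suffices hgen : ∀ (a : String), (ws.foldl (fun a w => a ++ w ++ " ") a).toList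
      = a.toList ++ ((ws.map String.toList).map (fun x => x ++ [' '])).flatten by
    simpa [renderS] using hgen ""
  induction ws with
  | nil => intro a; simp
  | cons w t ih =>
    intro a
    simp [List.foldl_cons, ih, String.toList_append]

theorem renderS_nil : renderS [] = "" := rfl

theorem renderS_concat (ws : List String) (w : String) :
    renderS ws ++ w ++ " " = renderS (ws ++ [w]) := by
  simp [renderS]

theorem renderS_ne_empty (ws : List String) (h : ws ≠ []) : renderS ws ≠ "" := by
  intro hcontra
  have := congrArg String.toList hcontra
  rw [renderS_toList] at this
  cases ws with
  | nil => exact h rfl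
  | cons x t => simp at this

theorem strip_renderS (ws : List String) (h : ws ≠ []) :
    PySem.Str.strip (renderS ws) = PySem.Str.strip (PySem.Str.join " " ws) := by
  apply String.ext
  rw [PySem.Str.toList_strip, PySem.Str.toList_strip, PySem.Str.toList_join,
    renderS_toList, flatten_blocks_eq_join _ (by simpa using h), strip_append_space]
  rfl

-- A's outputs accumulator factors out of the loop
theorem finishA_foldl_outs (eos pad : Int) (vocab : List String) (l : List (List Int)) :
    ∀ (outs : List String) (temp : String),
      finishA (l.foldl (stepA eos pad vocab) (outs, temp))
        = outs ++ finishA (l.foldl (stepA eos pad vocab) ([], temp)) := by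
  induction l with
  | nil =>
    intro outs temp
    by_cases ht : temp ≠ "" <;> simp [finishA, ht]
  | cons t rest ih =>
    intro outs temp
    rw [List.foldl_cons, List.foldl_cons, stepA_eq_ite, stepA_eq_ite]
    by_cases hs : pvStop eos pad t
    · rw [if_pos hs, if_pos hs]
      by_cases ht : temp ≠ ""
      · rw [if_pos ht, if_pos ht]
        dsimp only
        rw [ih (outs ++ [PySem.Str.strip temp]) ""]
        simp only [List.nil_append]
        rw [ih [PySem.Str.strip temp] ""]
        simp
      · rw [if_neg ht, if_neg ht]
        rw [ih outs temp]
    · rw [if_neg hs, if_neg hs]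
      dsimp only
      rw [ih outs (temp ++ pvWord vocab t ++ " "), ih [] (temp ++ pvWord vocab t ++ " ")]

theorem goA_cons_stop_ne (eos pad : Int) (vocab : List String) (t : List Int)
    (rest : List (List Int)) (temp : String) (hs : pvStop eos pad t = true) (ht : temp ≠ "") :
    goA eos pad vocab (t :: rest) temp = PySem.Str.strip temp :: goA eos pad vocab rest "" := by
  unfold goA
  rw [List.foldl_cons, stepA_eq_ite, if_pos hs, if_pos ht]
  rw [show (([] : List String) ++ [PySem.Str.strip temp], ("" : String))
      = ([PySem.Str.strip temp], ("" : String)) by simp]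
  rw [finishA_foldl_outs eos pad vocab rest [PySem.Str.strip temp] ""]
  rfl

theorem goA_cons_stop_eq (eos pad : Int) (vocab : List String) (t : List Int)
    (rest : List (List Int)) (hs : pvStop eos pad t = true) :
    goA eos pad vocab (t :: rest) "" = goA eos pad vocab rest "" := by
  unfold goA
  rw [List.foldl_cons, stepA_eq_ite, if_pos hs, if_neg (by simp : ¬("" : String) ≠ "")]

theorem goA_cons_go (eos pad : Int) (vocab : List String) (t : List Int)
    (rest : List (List Int)) (temp : String) (hs : pvStop eos pad t = false) :
    goA eos pad vocab (t :: rest) temp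
      = goA eos pad vocab rest (temp ++ pvWord vocab t ++ " ") := by
  unfold goA
  rw [List.foldl_cons, stepA_eq_ite, if_neg (by simp [hs])]

-- main invariant: A's loop with pending words ws equals B's run decomposition
theorem goA_eq_altGo (eos pad : Int) (vocab : List String) (l : List (List Int)) :
    ∀ (ws : List String),
      goA eos pad vocab l (renderS ws) =
        if ws = [] then sentenceFromIdsAltGo eos pad vocab l
        else PySem.Str.strip (PySem.Str.join " "
              (ws ++ ((l.takeWhile (fun u => !pvStop eos pad u)).map (pvWord vocab))))
            :: sentenceFromIdsAltGo eos pad vocab (l.dropWhile (fun u => !pvStop eos pad u)) := by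
  induction l with
  | nil =>
    intro ws
    by_cases h : ws = []
    · simp [h, goA, finishA, renderS_nil, sentenceFromIdsAltGo]
    · simp only [h, if_false, List.takeWhile_nil, List.dropWhile_nil, List.map_nil,
        List.append_nil, sentenceFromIdsAltGo]
      simp only [goA, List.foldl_nil, finishA, renderS_ne_empty ws h, ne_eq,
        not_false_eq_true, if_true, List.nil_append]
      rw [strip_renderS ws h]
  | cons t rest ih =>
    intro ws
    by_cases hs : pvStop eos pad t
    · have haltgo : sentenceFromIdsAltGo eos pad vocab (t :: rest)
          = sentenceFromIdsAltGo eos pad vocab rest := by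
        rw [sentenceFromIdsAltGo]; simp [hs]
      by_cases h : ws = []
      · rw [h, renderS_nil, goA_cons_stop_eq eos pad vocab t rest hs, haltgo]
        simpa [renderS_nil] using ih []
      · rw [goA_cons_stop_ne eos pad vocab t rest _ hs (renderS_ne_empty ws h)]
        have hnil := ih []
        rw [renderS_nil] at hnil
        simp only [if_pos rfl] at hnil
        rw [hnil, strip_renderS ws h]
        simp [h, List.takeWhile_cons, List.dropWhile_cons, hs, haltgo]
    · have hsf : pvStop eos pad t = false := by simpa using hs
      rw [goA_cons_go eos pad vocab t rest _ hsf, renderS_concat,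
        ih (ws ++ [pvWord vocab t])]
      simp only [List.append_ne_nil_of_right_ne_nil ws (by simp : [pvWord vocab t] ≠ []), if_false]
      by_cases h : ws = []
      · subst h
        rw [sentenceFromIdsAltGo]
        simp [hsf, List.takeWhile_cons, List.dropWhile_cons]
      · simp [h, List.takeWhile_cons, List.dropWhile_cons, hsf]

theorem portA_eq_goA (predIds : List (List Int)) (vocabList : List String) :
    sentenceFromIds predIds vocabList
      = goA (((PySem.List.index? vocabList "<EOS>").getD 0 : Nat) : Int)
          (((PySem.List.index? vocabList "<pad>").getD 0 : Nat) : Int) vocabList predIds "" := rfl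

-- ===== VERDICT (by name: the statement is the Claim_ definition above) =====
theorem sentenceFromIds_spec : Claim_equal_sentenceFromIds := by
  intro predIds vocabList _ _
  unfold Spec_sentenceFromIds
  rw [portA_eq_goA, show ("" : String) = renderS [] from rfl,
    goA_eq_altGo _ _ vocabList predIds []]
  simp only [if_pos rfl]
  rfl
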